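-- pv_equiv track=rewrite | github.com/matheustxaguiar/Programming-Period-1 | moduloapnp25.py | f_base10_para_base3
-- ===== SOURCE A (Python) =====
-- def f_base10_para_base3(num):
--     # Declaração de variáveis
--     nb3 = 0
--     cont = 1
--     divisor = num
--     resto = int()
--
--     # Processamento
--     while divisor != 0:
--         resto = divisor % 3
--         divisor = divisor // 3
--         nb3 = resto * cont + nb3
--         cont = cont * 10
--
--     # Saída de dados
--     return nb3
-- ===== SOURCE B (Python) =====
-- def f_base10_para_base3(num):
--     if num == 0:
--         return 0
--     return f_base10_para_base3(num // 3) * 10 + num % 3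
-- ===== Notes on version B (the rewrite author's own statement) =====
-- stated objective: simpler
-- what changed: Replaces the iterative loop that accumulates digits with a power-of-ten counter by a direct recursion on the quotient (f(n) = f(n//3)*10 + n%3), eliminating the nb3/cont/divisor state.
import Mathlib
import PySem

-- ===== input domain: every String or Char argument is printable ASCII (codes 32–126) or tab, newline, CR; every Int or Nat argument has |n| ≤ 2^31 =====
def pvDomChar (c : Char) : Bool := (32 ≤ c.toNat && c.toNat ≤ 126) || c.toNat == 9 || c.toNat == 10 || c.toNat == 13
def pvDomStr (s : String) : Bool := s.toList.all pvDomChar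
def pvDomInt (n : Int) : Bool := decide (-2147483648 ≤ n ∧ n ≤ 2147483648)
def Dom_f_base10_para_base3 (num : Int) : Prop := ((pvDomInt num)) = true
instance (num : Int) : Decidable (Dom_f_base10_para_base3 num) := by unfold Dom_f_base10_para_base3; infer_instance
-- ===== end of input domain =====

-- B replaces A's iterative digit accumulation (nb3/cont/divisor state) by a direct
-- recursion on the quotient: simpler decomposition, same O(log n) cost.


-- ===== PORT A =====
-- while divisor != 0: resto = divisor % 3; divisor = divisor // 3; nb3 = resto*cont + nb3; cont = cont*10
-- fuel only makes the loop total in Lean; with 0 ≤ num (Pre_) it never runs out.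
def pvLoopA : Nat → Int → Int → Int → Int
  | 0, _, nb3, _ => nb3
  | fuel + 1, divisor, nb3, cont =>
    if divisor = 0 then nb3
    else pvLoopA fuel (PySem.Int.floordiv divisor 3)
      ((PySem.Int.mod divisor 3) * cont + nb3) (cont * 10)

def f_base10_para_base3 (num : Int) : Int := pvLoopA (num.toNat + 1) num 0 1

-- ===== PORT B =====
-- if num == 0: return 0; return f(num // 3) * 10 + num % 3   (fuel for totality only)
def pvGoB : Nat → Int → Int
  | 0, _ => 0
  | fuel + 1, num =>
    if num = 0 then 0
    else pvGoB fuel (PySem.Int.floordiv num 3) * 10 + PySem.Int.mod num 3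

def f_base10_para_base3_alt (num : Int) : Int := pvGoB (num.toNat + 1) num

-- ===== PRECONDITION & SPEC =====
-- On negative num A's loop never terminates (divisor // 3 stays -1), so A never returns there.
def Pre_f_base10_para_base3 (num : Int) : Prop := 0 ≤ num
instance (num : Int) : Decidable (Pre_f_base10_para_base3 num) := by
  unfold Pre_f_base10_para_base3; infer_instance

def pvWitness_f_base10_para_base3 : Int := 11

def Spec_f_base10_para_base3 (num : Int) (out : Int) : Prop := out = f_base10_para_base3_alt num
instance (num : Int) (out : Int) : Decidable (Spec_f_base10_para_base3 num out) := by
  unfold Spec_f_base10_para_base3; infer_instance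

-- ===== CLAIM (what is proved, stated in full; the proofs are below) =====
def Claim_equal_f_base10_para_base3 : Prop :=
  ∀ (num : Int), Dom_f_base10_para_base3 num → Pre_f_base10_para_base3 num →
    Spec_f_base10_para_base3 num (f_base10_para_base3 num)

-- ===== LEMMAS AND PROOFS =====

-- mathematical value both ports compute for nonnegative input
def pvG (n : Nat) : Int :=
  if h : n = 0 then 0 else pvG (n / 3) * 10 + (n % 3 : Nat)
decreasing_by exact Nat.div_lt_self (Nat.pos_of_ne_zero h) (by omega)

theorem pvGoB_eq_pvG : ∀ (fuel n : Nat), n < fuel → pvGoB fuel (n : Int) = pvG n := by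
  intro fuel
  induction fuel with
  | zero => intro n h; omega
  | succ f ih =>
    intro n h
    rw [pvGoB, pvG]
    by_cases h0 : n = 0
    · simp [h0]
    · have hne : (n : Int) ≠ 0 := by exact_mod_cast h0
      have hf : PySem.Int.floordiv (n : Int) 3 = ((n / 3 : Nat) : Int) := by
        exact_mod_cast PySem.Int.floordiv_natCast n 3
      have hm : PySem.Int.mod (n : Int) 3 = ((n % 3 : Nat) : Int) := by
        exact_mod_cast PySem.Int.mod_natCast n 3
      rw [if_neg hne, dif_neg h0, hf, hm, ih (n / 3) (by omega)]

theorem pvLoopA_eq : ∀ (fuel n : Nat) (nb3 cont : Int), n < fuel →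
    pvLoopA fuel (n : Int) nb3 cont = cont * pvG n + nb3 := by
  intro fuel
  induction fuel with
  | zero => intro n _ _ h; omega
  | succ f ih =>
    intro n nb3 cont h
    rw [pvLoopA, pvG]
    by_cases h0 : n = 0
    · simp [h0]
    · have hne : (n : Int) ≠ 0 := by exact_mod_cast h0
      have hf : PySem.Int.floordiv (n : Int) 3 = ((n / 3 : Nat) : Int) := by
        exact_mod_cast PySem.Int.floordiv_natCast n 3
      have hm : PySem.Int.mod (n : Int) 3 = ((n % 3 : Nat) : Int) := by
        exact_mod_cast PySem.Int.mod_natCast n 3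
      rw [if_neg hne, dif_neg h0, hf, hm, ih (n / 3) _ _ (by omega)]
      ring

-- ===== VERDICT (by name: the statement is the Claim_ definition above) =====
theorem f_base10_para_base3_spec : Claim_equal_f_base10_para_base3 := by
  intro num _ hpre
  unfold Spec_f_base10_para_base3 f_base10_para_base3 f_base10_para_base3_alt
  obtain ⟨n, rfl⟩ : ∃ n : Nat, num = (n : Int) := ⟨num.toNat, (Int.toNat_of_nonneg hpre).symm⟩
  rw [Int.toNat_natCast, pvLoopA_eq (n + 1) n 0 1 (by omega),
    pvGoB_eq_pvG (n + 1) n (by omega)]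
  ring
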